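-- pv_equiv track=rewrite | github.com/daniel-reich/ubiquitous-fiesta | tftN3EdkSPfXxzWpi_9.py | sentence_searcher
-- ===== SOURCE A (Python) =====
-- def sentence_searcher(txt, n):
--   words = txt.split()
--   i_start = i_end = n if n >= 0 else len(words) + n
--   while not words[i_end].endswith('.'):
--     i_end += 1
--   while i_start > 0 and not words[i_start - 1].endswith('.'):
--     i_start -= 1
--   return ' '.join(words[i_start:i_end + 1])
-- ===== SOURCE B (Python) =====
-- from bisect import bisect_left
--
-- def sentence_searcher(txt, n):
--   words = txt.split()
--   m = n if n >= 0 else len(words) + n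
--   ends = [i for i, w in enumerate(words) if w.endswith('.')]
--   pos = bisect_left(ends, m)
--   i_end = ends[pos]
--   i_start = ends[pos - 1] + 1 if pos > 0 else 0
--   return ' '.join(words[i_start:i_end + 1])
-- ===== Notes on version B (the rewrite author's own statement) =====
-- stated objective: alternative
-- what changed: B replaces A's two word-by-word scans outward from index n with a precomputed sorted list of sentence-terminator positions queried once by bisect_left, reading the sentence boundaries off the index.
-- outside the precondition, e.g. on sentence_searcher('a. b c. d', -6): A returns 'c.', B returns 'a.'; on sentence_searcher('x. y z.', -5): A returns '', B returns 'x.'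
import Mathlib
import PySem

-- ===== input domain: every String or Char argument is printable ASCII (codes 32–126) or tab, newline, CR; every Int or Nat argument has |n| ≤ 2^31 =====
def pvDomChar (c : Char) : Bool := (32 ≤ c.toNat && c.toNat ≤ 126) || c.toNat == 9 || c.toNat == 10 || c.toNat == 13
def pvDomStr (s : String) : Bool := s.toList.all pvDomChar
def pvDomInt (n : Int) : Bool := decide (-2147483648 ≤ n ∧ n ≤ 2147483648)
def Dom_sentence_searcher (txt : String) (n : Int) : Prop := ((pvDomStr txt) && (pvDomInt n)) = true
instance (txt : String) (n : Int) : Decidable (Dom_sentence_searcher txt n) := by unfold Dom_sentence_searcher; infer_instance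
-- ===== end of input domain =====

-- B replaces A's two word-by-word scans outward from index n with a precomputed sorted list of
-- sentence-terminator positions queried once by bisect_left (same cost; alternative data structure).


-- ===== PORT A =====
-- 'while not words[i_end].endswith('.'): i_end += 1'; none = the IndexError when the scan runs off the list
def pvFwd (ws : List String) (i : Int) : Option Int :=
  match h : PySem.List.pyGet? ws i with
  | none => none
  | some w =>
    if PySem.Str.endswith w "." then some i else pvFwd ws (i + 1)
termination_by (((ws.length : Int) + 1) - i).toNat
decreasing_by
  have : PySem.Raise.InRange ws.length i := by
    by_contra hc
    rw [← PySem.List.pyGet?_eq_none_iff] at hc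
    simp [hc] at h
  simp [PySem.Raise.InRange] at this
  omega

-- 'while i_start > 0 and not words[i_start - 1].endswith('.'): i_start -= 1'
-- (the 'none' arm is Python's IndexError; unreachable when i ≤ len ws)
def pvBack (ws : List String) (i : Int) : Int :=
  if h : 0 < i then
    match PySem.List.pyGet? ws (i - 1) with
    | none => i
    | some w =>
      if PySem.Str.endswith w "." then i else pvBack ws (i - 1)
  else i
termination_by i.toNat
decreasing_by omega

def sentence_searcher (txt : String) (n : Int) : String :=
  let ws := PySem.Str.split₀ txt
  let m : Int := if n ≥ 0 then n else (ws.length : Int) + n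
  match pvFwd ws m with
  | none => ""   -- Python A raises IndexError here (outside Pre_)
  | some iEnd =>
    let iStart := pvBack ws m
    PySem.Str.join " " (PySem.List.slice ws (some iStart) (some (iEnd + 1)))

-- ===== PORT B =====
-- port of the stdlib call bisect.bisect_left by its contract on a sorted list:
-- the number of leading elements < x = insertion point of x
def pvBisectLeft (ends : List Int) (x : Int) : Int :=
  ((ends.takeWhile (fun e => decide (e < x))).length : Int)

def sentence_searcher_alt (txt : String) (n : Int) : String :=
  let ws := PySem.Str.split₀ txt
  let m : Int := if n ≥ 0 then n else (ws.length : Int) + n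
  let ends : List Int :=
    ((PySem.List.enumerate ws 0).filter (fun p => PySem.Str.endswith p.2 ".")).map (fun p => p.1)
  let pos : Int := pvBisectLeft ends m
  match PySem.List.pyGet? ends pos with
  | none => ""   -- Python B raises IndexError here (outside Pre_)
  | some iEnd =>
    let iStart : Int := if 0 < pos then (PySem.List.pyGetD ends (pos - 1) 0) + 1 else 0
    PySem.Str.join " " (PySem.List.slice ws (some iStart) (some (iEnd + 1)))

-- ===== PRECONDITION & SPEC =====
-- Pre_ excludes (a) inputs where A raises IndexError (no '.'-terminated word at or after the
-- normalized index, or the normalized index out of range), and (b) inputs with n < -len(words),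
-- where the normalized index is still negative: there Python's negative-index wraparound makes A's
-- returned fragment (often '') and B's bisect answer (the first sentence) equally accidental —
-- neither value is specified for an out-of-range sentence index.
def Pre_sentence_searcher (txt : String) (n : Int) : Prop :=
  let ws := PySem.Str.split₀ txt
  let m : Int := if n ≥ 0 then n else (ws.length : Int) + n
  0 ≤ m ∧ ∃ i : Nat, i < ws.length ∧ m ≤ (i : Int) ∧ PySem.Str.endswith ws[i]! "." = true
instance (txt : String) (n : Int) : Decidable (Pre_sentence_searcher txt n) := by
  unfold Pre_sentence_searcher; infer_instance

def pvWitness_sentence_searcher : String × Int := ("Hi there. Bye.", 1)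

def Spec_sentence_searcher (txt : String) (n : Int) (out : String) : Prop := out = sentence_searcher_alt txt n
instance (txt : String) (n : Int) (out : String) : Decidable (Spec_sentence_searcher txt n out) := by unfold Spec_sentence_searcher; infer_instance

-- ===== CLAIM (what is proved, stated in full; the proofs are below) =====
def Claim_equal_sentence_searcher : Prop := ∀ (txt : String) (n : Int), Dom_sentence_searcher txt n → Pre_sentence_searcher txt n → Spec_sentence_searcher txt n (sentence_searcher txt n)

-- ===== LEMMAS AND PROOFS =====

-- the terminator-index list B builds, abbreviated for the proofs
def pvEnds (ws : List String) : List Int :=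
  ((PySem.List.enumerate ws 0).filter (fun p => PySem.Str.endswith p.2 ".")).map (fun p => p.1)

theorem pvGet_lt {α : Type} {ws : List α} {e : Int} {w : α}
    (h : PySem.List.pyGet? ws e = some w) : -(ws.length : Int) ≤ e ∧ e < ws.length := by
  have hin : PySem.Raise.InRange ws.length e := by
    by_contra hc
    rw [← PySem.List.pyGet?_eq_none_iff] at hc
    simp [hc] at h
  simpa [PySem.Raise.InRange] using hin

theorem pvGet_some {α : Type} (ws : List α) {e : Int} (h0 : 0 ≤ e) (h1 : e < ws.length) :
    ∃ w, PySem.List.pyGet? ws e = some w := by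
  rw [PySem.List.pyGet?_eq_some_getElem ws h0 h1]
  exact ⟨_, rfl⟩

theorem pvEnds_sorted (ws : List String) : (pvEnds ws).Pairwise (· < ·) := by
  unfold pvEnds
  rw [List.pairwise_map]
  exact (PySem.List.pairwise_lt_enumerate ws 0).filter _

theorem pvEnds_mem (ws : List String) (x : Int) :
    x ∈ pvEnds ws ↔ 0 ≤ x ∧ ∃ w, PySem.List.pyGet? ws x = some w ∧ PySem.Str.endswith w "." = true := by
  unfold pvEnds
  simp only [List.mem_map, List.mem_filter, PySem.List.mem_enumerate_iff]
  constructor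
  · rintro ⟨p, ⟨⟨k, hk, rfl⟩, hT⟩, rfl⟩
    refine ⟨by simp, ws[k], ?_, by simpa using hT⟩
    simp [PySem.List.pyGet?_natCast, List.getElem?_eq_getElem hk]
  · rintro ⟨hx, w, hg, hT⟩
    have hlt := pvGet_lt hg
    have hg' : ws[x.toNat]? = some w := by
      rw [PySem.List.pyGet?_of_nonneg ws hx] at hg; exact hg
    have hk : x.toNat < ws.length := by omega
    rw [List.getElem?_eq_getElem hk] at hg'
    refine ⟨(x, w), ⟨⟨x.toNat, hk, ?_⟩, by simpa using hT⟩, rfl⟩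
    have hw : ws[x.toNat] = w := (Option.some.injEq _ _).mp hg'
    rw [hw]
    have : (0 : Int) + (x.toNat : Int) = x := by omega
    rw [this]

theorem pvTakeWhile_congr {α : Type} {p q : α → Bool} :
    ∀ {l : List α}, (∀ x ∈ l, p x = q x) → l.takeWhile p = l.takeWhile q
  | [], _ => rfl
  | a :: l, h => by
    have ha := h a (List.mem_cons_self ..)
    have ih := pvTakeWhile_congr (fun x hx => h x (List.mem_cons_of_mem _ hx))
    simp only [List.takeWhile_cons, ha]
    cases hq : q a <;> simp [ih]

theorem pvDropWhile_congr {α : Type} {p q : α → Bool} :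
    ∀ {l : List α}, (∀ x ∈ l, p x = q x) → l.dropWhile p = l.dropWhile q
  | [], _ => rfl
  | a :: l, h => by
    have ha := h a (List.mem_cons_self ..)
    have ih := pvDropWhile_congr (fun x hx => h x (List.mem_cons_of_mem _ hx))
    simp only [List.dropWhile_cons, ha]
    cases hq : q a <;> simp [ih]

theorem pvTakeWhile_nil {α : Type} {p : α → Bool} {l : List α}
    (h : ∀ x ∈ l, p x = false) : l.takeWhile p = [] := by
  cases l with
  | nil => rfl
  | cons a l => simp [h a (by simp)]

theorem pvDropWhile_nil {α : Type} {p : α → Bool} {l : List α}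
    (h : ∀ x ∈ l, p x = true) : l.dropWhile p = [] :=
  List.dropWhile_eq_nil_iff.mpr h

theorem pvDropWhile_head_of_mem {x : Int} :
    ∀ {l : List Int}, l.Pairwise (· < ·) → x ∈ l →
      (l.dropWhile (fun e => decide (e < x))).head? = some x
  | a :: tl, hs, hx => by
    have hpc := List.pairwise_cons.mp hs
    rcases List.mem_cons.mp hx with rfl | hx'
    · simp
    · have halt : a < x := hpc.1 x hx'
      have ih := pvDropWhile_head_of_mem hpc.2 hx'
      simp [halt, ih]

theorem pvTakeWhile_getLast_of_mem {x : Int} :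
    ∀ {l : List Int}, l.Pairwise (· < ·) → x ∈ l →
      (l.takeWhile (fun e => decide (e ≤ x))).getLast? = some x
  | a :: tl, hs, hx => by
    have hpc := List.pairwise_cons.mp hs
    rcases List.mem_cons.mp hx with rfl | hx'
    · have htl : tl.takeWhile (fun e => decide (e ≤ x)) = [] :=
        pvTakeWhile_nil (fun e he => by
          have := hpc.1 e he
          simp only [decide_eq_false_iff_not]
          omega)
      simp [htl]
    · have halt : a < x := hpc.1 x hx'
      have ih := pvTakeWhile_getLast_of_mem hpc.2 hx'
      have hne : tl.takeWhile (fun e => decide (e ≤ x)) ≠ [] := by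
        intro hnil; rw [hnil] at ih; simp at ih
      simp [le_of_lt halt, List.getLast?_cons, ih]


theorem pvFwd_none {ws : List String} {i : Int} (h : PySem.List.pyGet? ws i = none) :
    pvFwd ws i = none := by
  rw [pvFwd.eq_def]
  split
  · rfl
  · rename_i w hw; rw [hw] at h; cases h

theorem pvFwd_some {ws : List String} {i : Int} {w : String}
    (h : PySem.List.pyGet? ws i = some w) :
    pvFwd ws i = if PySem.Str.endswith w "." then some i else pvFwd ws (i + 1) := by
  rw [pvFwd.eq_def]
  split
  · rename_i hw; rw [hw] at h; cases h
  · rename_i w' hw; rw [hw] at h; cases h; rfl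

theorem pvBack_nonpos {ws : List String} {i : Int} (hi : ¬ 0 < i) : pvBack ws i = i := by
  rw [pvBack.eq_def, dif_neg hi]

theorem pvBack_pos_some {ws : List String} {i : Int} {w : String} (hi : 0 < i)
    (h : PySem.List.pyGet? ws (i - 1) = some w) :
    pvBack ws i = if PySem.Str.endswith w "." then i else pvBack ws (i - 1) := by
  rw [pvBack.eq_def, dif_pos hi]
  split
  · rename_i hw; rw [hw] at h; cases h
  · rename_i w' hw; rw [hw] at h; cases h; rfl

-- A's forward scan from a nonnegative index finds the first terminator index ≥ i
theorem pvFwd_eq (ws : List String) (i : Int) (hi : 0 ≤ i) :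
    pvFwd ws i = (List.dropWhile (fun e => decide (e < i)) (pvEnds ws)).head? := by
  induction i using pvFwd.induct ws with
  | case1 i h =>
    rw [pvFwd_none h]
    have hlen : (ws.length : Int) ≤ i := by
      by_contra hc
      obtain ⟨w, hw⟩ := pvGet_some ws hi (by omega)
      rw [h] at hw; simp at hw
    have hdrop : (pvEnds ws).dropWhile (fun e => decide (e < i)) = [] := by
      refine pvDropWhile_nil (fun e he => ?_)
      obtain ⟨-, w, hg, -⟩ := (pvEnds_mem ws e).mp he
      have := pvGet_lt hg
      simp only [decide_eq_true_eq]
      omega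
    rw [hdrop]; rfl
  | case2 i w h hT =>
    rw [pvFwd_some h, if_pos hT]
    have hmem : i ∈ pvEnds ws := (pvEnds_mem ws i).mpr ⟨hi, w, h, hT⟩
    exact (pvDropWhile_head_of_mem (pvEnds_sorted ws) hmem).symm
  | case3 i w h hT ih =>
    rw [pvFwd_some h, if_neg hT]
    have hni : i ∉ pvEnds ws := by
      intro hmem
      obtain ⟨-, w', hg', hT'⟩ := (pvEnds_mem ws i).mp hmem
      rw [h] at hg'
      exact hT ((Option.some.injEq _ _).mp hg' ▸ hT')
    rw [ih (by omega)]
    congr 1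
    refine pvDropWhile_congr (fun e he => ?_)
    have : e ≠ i := fun hei => hni (hei ▸ he)
    simp only [decide_eq_decide]
    omega
-- A's backward scan stops one past the last terminator index < i (or at 0)
theorem pvBack_eq (ws : List String) (i : Int) (h0 : 0 ≤ i) (h1 : i ≤ ws.length) :
    pvBack ws i = (match (List.takeWhile (fun e => decide (e < i)) (pvEnds ws)).getLast? with
      | some e => e + 1 | none => 0) := by
  induction i using pvBack.induct ws with
  | case1 i hpos h =>
    exfalso
    obtain ⟨w, hw⟩ := pvGet_some ws (e := i - 1) (by omega) (by omega)
    rw [h] at hw; simp at hw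
  | case2 i hpos w h hT =>
    rw [pvBack_pos_some hpos h, if_pos hT]
    have hmem : i - 1 ∈ pvEnds ws := (pvEnds_mem ws (i - 1)).mpr ⟨by omega, w, h, hT⟩
    have hcg : (pvEnds ws).takeWhile (fun e => decide (e < i)) =
        (pvEnds ws).takeWhile (fun e => decide (e ≤ i - 1)) := by
      refine pvTakeWhile_congr (fun e he => ?_)
      simp only [decide_eq_decide]; omega
    rw [hcg, pvTakeWhile_getLast_of_mem (pvEnds_sorted ws) hmem]
    show i = i - 1 + 1
    omega
  | case3 i hpos w h hT ih =>
    rw [pvBack_pos_some hpos h, if_neg hT]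
    have hni : i - 1 ∉ pvEnds ws := by
      intro hmem
      obtain ⟨-, w', hg', hT'⟩ := (pvEnds_mem ws (i - 1)).mp hmem
      rw [h] at hg'
      exact hT ((Option.some.injEq _ _).mp hg' ▸ hT')
    rw [ih (by omega) (by omega)]
    have hcg : (pvEnds ws).takeWhile (fun e => decide (e < i)) =
        (pvEnds ws).takeWhile (fun e => decide (e < i - 1)) := by
      refine pvTakeWhile_congr (fun e he => ?_)
      have : e ≠ i - 1 := fun hei => hni (hei ▸ he)
      simp only [decide_eq_decide]; omega
    rw [hcg]
  | case4 i hpos =>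
    have hz : i = 0 := by omega
    subst hz
    rw [pvBack_nonpos hpos]
    have htw : (pvEnds ws).takeWhile (fun e => decide (e < 0)) = [] := by
      refine pvTakeWhile_nil (fun e he => ?_)
      obtain ⟨he0, -⟩ := (pvEnds_mem ws e).mp he
      simp only [decide_eq_false_iff_not]; omega
    rw [htw]; rfl

-- a (dropWhile p l).head? element fails p
theorem pvDropWhile_head_not {α : Type} {p : α → Bool} :
    ∀ {l : List α} {a : α}, (l.dropWhile p).head? = some a → p a = false
  | [], a, h => by simp at h
  | b :: l, a, h => by
    by_cases hb : p b = true
    · rw [List.dropWhile_cons, if_pos hb] at h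
      exact pvDropWhile_head_not h
    · rw [List.dropWhile_cons, if_neg hb] at h
      simp at h
      rw [← h]
      exact eq_false_of_ne_true hb

theorem pvHead?_mem {α : Type} {l : List α} {a : α} (h : l.head? = some a) : a ∈ l := by
  cases l with
  | nil => simp at h
  | cons b l => simp at h; simp [h]

-- ===== VERDICT (by name: the statement is the Claim_ definition above) =====
theorem sentence_searcher_spec : Claim_equal_sentence_searcher := by
  intro txt n hdom hpre
  unfold Spec_sentence_searcher sentence_searcher sentence_searcher_alt
  simp only [Pre_sentence_searcher] at hpre
  obtain ⟨hm, -⟩ := hpre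
  set ws := PySem.Str.split₀ txt with hws
  set m : Int := if n ≥ 0 then n else (ws.length : Int) + n with hmdef
  set tw := (pvEnds ws).takeWhile (fun e => decide (e < m)) with htw
  set dw := (pvEnds ws).dropWhile (fun e => decide (e < m)) with hdw
  have hsplit : tw ++ dw = pvEnds ws := List.takeWhile_append_dropWhile
  -- B's bisect position and lookup
  have hpos : pvBisectLeft (pvEnds ws) m = (tw.length : Int) := rfl
  have hget : PySem.List.pyGet? (pvEnds ws) (tw.length : Int) = dw.head? := by
    rw [← hsplit]
    have := PySem.List.pyGet?_append_right tw dw 0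
    simpa [List.head?_eq_getElem?] using this
  -- A's forward scan
  have hfwd : pvFwd ws m = dw.head? := pvFwd_eq ws m hm
  show (match pvFwd ws m with
        | none => ""
        | some iEnd => PySem.Str.join " " (PySem.List.slice ws (some (pvBack ws m)) (some (iEnd + 1)))) =
       (match PySem.List.pyGet? (pvEnds ws) (pvBisectLeft (pvEnds ws) m) with
        | none => ""
        | some iEnd => PySem.Str.join " "
            (PySem.List.slice ws
              (some (if 0 < pvBisectLeft (pvEnds ws) m then
                       PySem.List.pyGetD (pvEnds ws) (pvBisectLeft (pvEnds ws) m - 1) 0 + 1 else 0))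
              (some (iEnd + 1))))
  rw [hpos, hget, hfwd]
  cases hhd : dw.head? with
  | none => rfl
  | some iEnd =>
    -- iEnd is a real terminator index ≥ m, so m ≤ ws.length
    have hmemdw : iEnd ∈ dw := pvHead?_mem hhd
    have hmem : iEnd ∈ pvEnds ws := by
      rw [← hsplit]; exact List.mem_append_right _ hmemdw
    have hnotlt : ¬ iEnd < m := by
      have := pvDropWhile_head_not hhd
      simpa using this
    obtain ⟨-, w, hg, -⟩ := (pvEnds_mem ws iEnd).mp hmem
    have hrange := pvGet_lt hg
    have hmlen : m ≤ (ws.length : Int) := by omega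
    -- A's backward scan = B's bisect-based start
    have hback := pvBack_eq ws m hm hmlen
    have hstart : pvBack ws m =
        (if 0 < (tw.length : Int) then PySem.List.pyGetD (pvEnds ws) ((tw.length : Int) - 1) 0 + 1 else 0) := by
      rw [hback]
      by_cases htw0 : tw = []
      · rw [← htw, htw0]
        simp
      · have hlen : 0 < tw.length := List.length_pos_iff.mpr htw0
        rw [if_pos (by exact_mod_cast hlen)]
        have hcast : (tw.length : Int) - 1 = ((tw.length - 1 : Nat) : Int) := by omega
        rw [hcast, PySem.List.pyGetD_natCast]
        have hgetd : (pvEnds ws).getD (tw.length - 1) 0 = tw.getLast?.getD 0 := by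
          rw [← hsplit, List.getD_eq_getElem?_getD,
              List.getElem?_append_left (by omega), ← List.getLast?_eq_getElem?]
        obtain ⟨g, hgl⟩ : ∃ g, tw.getLast? = some g := by
          cases hg' : tw.getLast? with
          | none => exact absurd (List.getLast?_eq_none_iff.mp hg') htw0
          | some g => exact ⟨g, rfl⟩
        rw [hgetd, hgl]
        rfl
    rw [hstart]
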